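-- pv_equiv track=rewrite | github.com/devin-fisher/treadstone | lib/timeline_analysis/timeline_lib.py | start_counter_list_function
-- ===== SOURCE A (Python) =====
-- def start_counter_list_function(kill_list, counter_list):
--     start_list = [{}]
--     counter_list = []
--     kill_counter = 0
--     kill_length = len(kill_list)
--     start_list[0] = kill_list[0]
--     for a in range(1,kill_length):
--         kill_time = kill_list[a]['time']
--
--         current = int(kill_list[a]['time'])
--         last = a - 1
--         before = int(kill_list[last]["time"])
--         delta = current - before
--         if delta > 15:
--             cur = int(kill_list[a]["time"])
--             start_list.append(kill_list[a])
--             counter_list.append(kill_counter)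
--             kill_counter = 0
--         else:
--             kill_counter = kill_counter + 1
--             # start_list.append(kill_list[a])
--     counter_list.append(kill_counter)
--
--     return start_list, counter_list
-- ===== SOURCE B (Python) =====
-- def start_counter_list_function(kill_list, counter_list):
--     runs = [[kill_list[0]]]
--     prev = kill_list[0]
--     for d in kill_list[1:]:
--         if int(d['time']) - int(prev['time']) > 15:
--             runs.append([d])
--         else:
--             runs[-1].append(d)
--         prev = d
--     return [run[0] for run in runs], [len(run) - 1 for run in runs]
-- ===== Notes on version B (the rewrite author's own statement) =====
-- stated objective: simpler
-- what changed: B builds the explicit list of runs (segments split where the time delta exceeds 15) in one pass over the elements, then derives the outputs by mapping head and len-1 over the runs, instead of A's index-arithmetic loop with a running counter.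
import Mathlib
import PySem

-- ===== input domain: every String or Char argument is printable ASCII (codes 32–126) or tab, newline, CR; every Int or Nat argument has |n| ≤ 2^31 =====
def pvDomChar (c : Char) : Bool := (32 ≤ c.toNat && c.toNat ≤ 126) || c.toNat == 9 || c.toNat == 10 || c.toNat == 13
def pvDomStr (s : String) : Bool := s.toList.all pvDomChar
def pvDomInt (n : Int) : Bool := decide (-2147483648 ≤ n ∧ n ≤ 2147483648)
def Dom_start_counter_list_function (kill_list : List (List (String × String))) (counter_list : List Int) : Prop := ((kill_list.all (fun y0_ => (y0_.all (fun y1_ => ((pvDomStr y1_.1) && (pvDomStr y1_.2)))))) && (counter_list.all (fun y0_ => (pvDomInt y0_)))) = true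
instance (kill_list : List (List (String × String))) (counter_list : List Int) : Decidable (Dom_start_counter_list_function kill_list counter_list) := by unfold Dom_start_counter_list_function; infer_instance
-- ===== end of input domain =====

-- B builds the explicit list of runs (split where the time delta exceeds 15) in one pass, then maps
-- head / (length-1) over the runs — simpler than A's index loop with a running counter; same cost.


-- d['time'] parsed as a Python int; total helper (Pre_ guarantees it succeeds)
def pvTime? (d : List (String × String)) : Option Int :=
  (d.find? (fun p => p.1 == "time")).bind (fun p => PySem.Int.ofStr? p.2)

def pvTime (d : List (String × String)) : Int := (pvTime? d).getD 0

-- ===== PORT A =====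
-- the for-loop over range(1, kill_length); state = (start_list, counter_list, kill_counter)
def startA_loop (kl : List (List (String × String))) (idxs : List Int)
    (sl : List (List (String × String))) (cl : List Int) (kc : Int) :
    (List (List (String × String))) × List Int :=
  match idxs with
  | [] => (sl, cl ++ [kc])
  | a :: rest =>
    let current := pvTime (PySem.List.pyGetD kl a [])
    let before := pvTime (PySem.List.pyGetD kl (a - 1) [])
    if current - before > 15 then
      startA_loop kl rest (sl ++ [PySem.List.pyGetD kl a []]) (cl ++ [kc]) 0
    else
      startA_loop kl rest sl cl (kc + 1)

def start_counter_list_function (kill_list : List (List (String × String))) (counter_list : List Int) : (List (List (String × String))) × List Int :=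
  let kill_length : Int := kill_list.length
  let first := PySem.List.pyGetD kill_list 0 []   -- kill_list[0] (Pre_ excludes the empty list, where Python raises IndexError)
  startA_loop kill_list (PySem.List.pyRange 1 kill_length 1) [first] [] 0

-- ===== PORT B =====
-- one pass building the runs, carrying the previous element and the current run
def runsAux (cur : List (List (String × String))) (prev : List (String × String)) :
    List (List (String × String)) → List (List (List (String × String)))
  | [] => [cur]
  | d :: rest =>
    if pvTime d - pvTime prev > 15 then cur :: runsAux [d] d rest
    else runsAux (cur ++ [d]) d rest

def start_counter_list_function_alt (kill_list : List (List (String × String))) (counter_list : List Int) : (List (List (String × String))) × List Int :=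
  match kill_list with
  | [] => ([], [])   -- unreachable under Pre_ (Python raises IndexError on kill_list[0])
  | h :: t =>
    let runs := runsAux [h] h t
    (runs.map (fun r => r.headD []), runs.map (fun r => (r.length : Int) - 1))

-- ===== PRECONDITION & SPEC =====
-- Pre_ excludes exactly the inputs where Python A raises: the empty list (IndexError on kill_list[0])
-- and, when the loop runs (length ≥ 2), elements whose 'time' key is missing (KeyError) or not an int-parseable string (ValueError).
def Pre_start_counter_list_function (kill_list : List (List (String × String))) (counter_list : List Int) : Prop :=
  kill_list ≠ [] ∧ (2 ≤ kill_list.length → ∀ d ∈ kill_list, (pvTime? d).isSome)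
instance (kill_list : List (List (String × String))) (counter_list : List Int) : Decidable (Pre_start_counter_list_function kill_list counter_list) := by unfold Pre_start_counter_list_function; infer_instance

def pvWitness_start_counter_list_function : (List (List (String × String))) × List Int :=
  ([[("time", "3")], [("time", "30")], [("time", "31")]], [])

def Spec_start_counter_list_function (kill_list : List (List (String × String))) (counter_list : List Int) (out : (List (List (String × String))) × List Int) : Prop := out = start_counter_list_function_alt kill_list counter_list
instance (kill_list : List (List (String × String))) (counter_list : List Int) (out : (List (List (String × String))) × List Int) : Decidable (Spec_start_counter_list_function kill_list counter_list out) := by unfold Spec_start_counter_list_function; infer_instance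

-- ===== CLAIM (what is proved, stated in full; the proofs are below) =====
def Claim_equal_start_counter_list_function : Prop := ∀ (kill_list : List (List (String × String))) (counter_list : List Int), Dom_start_counter_list_function kill_list counter_list → Pre_start_counter_list_function kill_list counter_list → Spec_start_counter_list_function kill_list counter_list (start_counter_list_function kill_list counter_list)

-- ===== LEMMAS AND PROOFS =====

-- the first run produced by runsAux extends cur on the right
theorem runsAux_head (t : List (List (String × String))) :
    ∀ cur prev, ∃ e rs, runsAux cur prev t = (cur ++ e) :: rs := by
  induction t with
  | nil => intro cur prev; exact ⟨[], [], by simp [runsAux]⟩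
  | cons d r ih =>
    intro cur prev
    by_cases h : pvTime d - pvTime prev > 15
    · exact ⟨[], runsAux [d] d r, by simp [runsAux, h]⟩
    · obtain ⟨e, rs, he⟩ := ih (cur ++ [d]) d
      exact ⟨[d] ++ e, rs, by simp [runsAux, h, he]⟩

theorem startA_loop_eq_runs (t : List (List (String × String))) :
    ∀ (j : ℕ) (kl : List (List (String × String))) prev cur sl cl,
    kl.drop j = prev :: t →
    startA_loop kl (PySem.List.pyRange (j + 1) kl.length 1) sl cl ((cur.length : Int) - 1)
      = (sl ++ ((runsAux cur prev t).tail).map (fun r => r.headD []),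
         cl ++ (runsAux cur prev t).map (fun r => (r.length : Int) - 1)) := by
  induction t with
  | nil =>
    intro j kl prev cur sl cl hdrop
    have hlen : kl.length = j + 1 := by
      have := congrArg List.length hdrop
      simp at this; omega
    rw [PySem.List.pyRange_one_eq_nil (by simp [hlen])]
    simp [startA_loop, runsAux]
  | cons d r ih =>
    intro j kl prev cur sl cl hdrop
    have hlen : kl.length = j + 2 + r.length := by
      have := congrArg List.length hdrop
      simp at this; omega
    have hprev : kl[j]? = some prev := by
      have : (kl.drop j)[0]? = kl[j]? := by simp
      rw [hdrop] at this; simpa using this.symm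
    have hd : kl[j + 1]? = some d := by
      have : (kl.drop j)[1]? = kl[j + 1]? := by simp
      rw [hdrop] at this; simpa using this.symm
    have hdrop' : kl.drop (j + 1) = d :: r := by
      have : kl.drop (j + 1) = (kl.drop j).drop 1 := by simp [List.drop_drop]
      rw [this, hdrop]; rfl
    have hcons : PySem.List.pyRange ((j : Int) + 1) kl.length 1
        = ((j : Int) + 1) :: PySem.List.pyRange ((j : Int) + 1 + 1) kl.length 1 :=
      PySem.List.pyRange_one_cons (by simp [hlen]; omega)
    have hgd : PySem.List.pyGetD kl ((j : Int) + 1) [] = d := by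
      have : ((j : Int) + 1) = ((j + 1 : ℕ) : Int) := by push_cast; ring
      rw [this, PySem.List.pyGetD_natCast]
      simp [List.getD, hd]
    have hgp : PySem.List.pyGetD kl ((j : Int) + 1 - 1) [] = prev := by
      have : ((j : Int) + 1 - 1) = ((j : ℕ) : Int) := by push_cast; ring
      rw [this, PySem.List.pyGetD_natCast]
      simp [List.getD, hprev]
    rw [hcons]
    show startA_loop kl _ sl cl _ = _
    rw [startA_loop]
    simp only [hgd, hgp]
    by_cases hc : pvTime d - pvTime prev > 15
    · rw [if_pos hc]
      have h0 : (0 : Int) = (([d] : List (List (String × String))).length : Int) - 1 := by simp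
      have hcast : ((j : Int) + 1 + 1) = (((j + 1 : ℕ) : Int) + 1) := by push_cast; ring
      rw [h0, hcast, ih (j + 1) kl d [d] (sl ++ [d]) (cl ++ [(cur.length : Int) - 1]) hdrop']
      obtain ⟨e, rs, he⟩ := runsAux_head r [d] d
      simp [runsAux, hc, he]
    · rw [if_neg hc]
      have h1 : (cur.length : Int) - 1 + 1 = ((cur ++ [d]).length : Int) - 1 := by simp
      have hcast : ((j : Int) + 1 + 1) = (((j + 1 : ℕ) : Int) + 1) := by push_cast; ring
      rw [h1, hcast, ih (j + 1) kl d (cur ++ [d]) sl cl hdrop']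
      simp [runsAux, hc]

-- ===== VERDICT (by name: the statement is the Claim_ definition above) =====
theorem start_counter_list_function_spec : Claim_equal_start_counter_list_function := by
  intro kl cl _ hpre
  unfold Spec_start_counter_list_function
  obtain ⟨hne, -⟩ := hpre
  obtain ⟨h, t, rfl⟩ := List.exists_cons_of_ne_nil hne
  have h0 : ((0 : ℕ) : Int) + 1 = 1 := by simp
  have := startA_loop_eq_runs t 0 (h :: t) h [h] [h] [] (by simp)
  rw [h0] at this
  unfold start_counter_list_function
  simp only [PySem.List.pyGetD_zero_cons] at *
  rw [show (0 : Int) = (([h] : List (List (String × String))).length : Int) - 1 by simp, this]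
  obtain ⟨e, rs, he⟩ := runsAux_head t [h] h
  unfold start_counter_list_function_alt
  simp [he]
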